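-- pv_equiv track=rewrite | github.com/llf159/lianghua | stats_core.py | _exec_date
-- ===== SOURCE A (Python) =====
-- from typing import Iterable, Sequence, Dict, List, Optional, Callable, Any, Literal
--
-- def _exec_date(d: str, mode: str, trade_days: List[str]) -> str:
--     if mode == "close":
--         return d
--     # next_open
--     if d not in trade_days:
--         # 找到 >= d 的第一个交易日作为指令日
--         trade_days = [x for x in trade_days if x >= d]
--         if not trade_days:
--             return d
--         d = trade_days[0]
--     i = trade_days.index(d)
--     j = min(i + 1, len(trade_days) - 1)
--     return trade_days[j]
-- ===== SOURCE B (Python) =====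
-- def _exec_date(d: str, mode: str, trade_days: list) -> str:
--     if mode == "close":
--         return d
--     # single pass: early-exit at the first occurrence of d, otherwise
--     # collect the first two elements >= d (in list order)
--     first_ge = None
--     second_ge = None
--     n = len(trade_days)
--     for idx, x in enumerate(trade_days):
--         if x == d:
--             return trade_days[idx + 1] if idx + 1 < n else trade_days[-1]
--         if x >= d:
--             if first_ge is None:
--                 first_ge = x
--             elif second_ge is None:
--                 second_ge = x
--     if first_ge is None:
--         return d
--     return second_ge if second_ge is not None else first_ge
-- ===== Notes on version B (the rewrite author's own statement) =====
-- stated objective: alternative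
-- what changed: Replaces A's membership test + filter-list construction + .index + indexing (up to three scans and an allocation) by one single pass with an index counter that early-exits at the first occurrence of d and otherwise tracks the first two elements >= d.
import Mathlib
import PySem

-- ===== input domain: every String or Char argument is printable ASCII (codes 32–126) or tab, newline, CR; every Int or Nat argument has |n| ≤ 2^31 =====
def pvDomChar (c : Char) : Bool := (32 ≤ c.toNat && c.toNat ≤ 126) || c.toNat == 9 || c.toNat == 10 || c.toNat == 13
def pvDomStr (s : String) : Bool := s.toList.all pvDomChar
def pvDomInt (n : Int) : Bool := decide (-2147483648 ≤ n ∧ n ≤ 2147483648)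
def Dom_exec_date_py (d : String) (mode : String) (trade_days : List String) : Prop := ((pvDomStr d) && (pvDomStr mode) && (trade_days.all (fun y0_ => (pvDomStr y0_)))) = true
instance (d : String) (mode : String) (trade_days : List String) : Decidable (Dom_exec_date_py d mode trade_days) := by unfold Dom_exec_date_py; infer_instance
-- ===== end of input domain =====

-- ===== PORT A =====
-- B replaces A's membership test + filter list + .index + indexing (up to three scans) by one
-- single pass with an index counter (alternative decomposition, same O(n) cost).
-- helper: A's final three lines (i = trade_days.index(d); j = min(i+1, len-1); return trade_days[j])
def execTailA (trade_days : List String) (d : String) : String :=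
  match PySem.List.index? trade_days d with
  | some i => PySem.List.pyGetD trade_days (min ((i : Int) + 1) ((trade_days.length : Int) - 1)) d
  | none => d   -- unreachable: d is in trade_days whenever this helper is called

def exec_date_py (d : String) (mode : String) (trade_days : List String) : String :=
  if mode == "close" then d
  else if trade_days.contains d then
    execTailA trade_days d
  else
    -- trade_days = [x for x in trade_days if x >= d]
    match trade_days.filter (fun x => decide (d ≤ x)) with
    | [] => d
    | d' :: rest => execTailA (d' :: rest) d'

-- ===== PORT B =====
-- the enumerate loop of Source B: idx counter, early exit at x == d, else track first/second element >= d
def altLoopB (d : String) (trade_days : List String) : List String → Nat → Option String → Option String → String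
  | [], _, first_ge, second_ge =>
      match first_ge with
      | none => d
      | some fg =>
        match second_ge with
        | some sg => sg
        | none => fg
  | x :: rest, idx, first_ge, second_ge =>
      if x == d then
        if idx + 1 < trade_days.length then PySem.List.pyGetD trade_days ((idx : Int) + 1) d
        else PySem.List.pyGetD trade_days (-1) d
      else if d ≤ x then
        match first_ge with
        | none => altLoopB d trade_days rest (idx + 1) (some x) second_ge
        | some _ =>
          match second_ge with
          | none => altLoopB d trade_days rest (idx + 1) first_ge (some x)
          | some _ => altLoopB d trade_days rest (idx + 1) first_ge second_ge
      else altLoopB d trade_days rest (idx + 1) first_ge second_ge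

def exec_date_py_alt (d : String) (mode : String) (trade_days : List String) : String :=
  if mode == "close" then d
  else altLoopB d trade_days trade_days 0 none none

-- ===== PRECONDITION & SPEC =====
def Spec_exec_date_py (d : String) (mode : String) (trade_days : List String) (out : String) : Prop := out = exec_date_py_alt d mode trade_days
instance (d : String) (mode : String) (trade_days : List String) (out : String) : Decidable (Spec_exec_date_py d mode trade_days out) := by unfold Spec_exec_date_py; infer_instance

-- ===== CLAIM (what is proved, stated in full; the proofs are below) =====
def Claim_equal_exec_date_py : Prop := ∀ (d : String) (mode : String) (trade_days : List String), Dom_exec_date_py d mode trade_days → Spec_exec_date_py d mode trade_days (exec_date_py d mode trade_days)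

-- ===== LEMMAS AND PROOFS =====

-- execTailA unfolded at a known index
theorem execTailA_eq (td : List String) (d : String) (k : Nat)
    (h : PySem.List.index? td d = some k) :
    execTailA td d = PySem.List.pyGetD td (min ((k : Int) + 1) ((td.length : Int) - 1)) d := by
  unfold execTailA
  rw [h]

-- when d occurs in the remaining suffix l (= T.drop idx) at first position k, the loop
-- early-exits there
theorem altLoopB_mem (d : String) (T : List String) :
    ∀ (l : List String) (idx : Nat) (fg sg : Option String) (k : Nat),
      T.drop idx = l → PySem.List.index? l d = some k →
      altLoopB d T l idx fg sg =
        if idx + k + 1 < T.length then PySem.List.pyGetD T (((idx + k : Nat) : Int) + 1) d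
        else PySem.List.pyGetD T (-1) d := by
  intro l
  induction l with
  | nil =>
    intro idx fg sg k _ h
    rw [PySem.List.index?_eq_idxOf?] at h
    simp at h
  | cons x rest ih =>
    intro idx fg sg k hdrop hk
    by_cases hx : x = d
    · subst hx
      rw [PySem.List.index?_cons_self] at hk
      injection hk with hk0
      subst hk0
      simp [altLoopB]
    · have hne : (x == d) = false := by simp [hx]
      rw [PySem.List.index?_cons_of_ne rest hx] at hk
      cases hrest : PySem.List.index? rest d with
      | none => rw [hrest] at hk; simp at hk
      | some k' =>
        rw [hrest] at hk
        simp only [Option.map_some, Option.some.injEq] at hk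
        have hkk : k = k' + 1 := by omega
        subst hkk
        have hdrop' : T.drop (idx + 1) = rest := by
          have h1 : T.drop (idx + 1) = (T.drop idx).drop 1 := by
            rw [List.drop_drop]
          rw [h1, hdrop]; rfl
        have harith : idx + (k' + 1) + 1 = (idx + 1) + k' + 1 := by omega
        have final : ∀ fg' sg', altLoopB d T rest (idx + 1) fg' sg' =
            if idx + (k' + 1) + 1 < T.length then
              PySem.List.pyGetD T (((idx + (k' + 1) : Nat) : Int) + 1) d
            else PySem.List.pyGetD T (-1) d := by
          intro fg' sg'
          rw [ih (idx + 1) fg' sg' k' hdrop' hrest, harith]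
          congr 2
          push_cast; ring
        rw [show altLoopB d T (x :: rest) idx fg sg =
            (if x == d then
              (if idx + 1 < T.length then PySem.List.pyGetD T ((idx : Int) + 1) d
               else PySem.List.pyGetD T (-1) d)
            else if d ≤ x then
              (match fg with
               | none => altLoopB d T rest (idx + 1) (some x) sg
               | some _ =>
                 match sg with
                 | none => altLoopB d T rest (idx + 1) fg (some x)
                 | some _ => altLoopB d T rest (idx + 1) fg sg)
            else altLoopB d T rest (idx + 1) fg sg) from rfl]
        rw [hne]
        simp only [Bool.false_eq_true, if_false]
        by_cases hle : d ≤ x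
        · rw [if_pos hle]
          cases fg with
          | none => exact final (some x) sg
          | some f => cases sg with
            | none => exact final (some f) (some x)
            | some s => exact final (some f) (some s)
        · rw [if_neg hle]
          exact final fg sg

-- when d does not occur in the remaining suffix, the loop returns according to the
-- accumulators extended by the filtered suffix
theorem altLoopB_not_mem (d : String) (T : List String) :
    ∀ (l : List String) (idx : Nat),
      d ∉ l →
      (altLoopB d T l idx none none =
        (match l.filter (fun x => decide (d ≤ x)) with
         | [] => d
         | [fg] => fg
         | _ :: sg :: _ => sg)) ∧
      (∀ f, altLoopB d T l idx (some f) none =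
        (match l.filter (fun x => decide (d ≤ x)) with
         | [] => f
         | sg :: _ => sg)) ∧
      (∀ f s, altLoopB d T l idx (some f) (some s) = s) := by
  intro l
  induction l with
  | nil => intro idx _; exact ⟨rfl, fun f => rfl, fun f s => rfl⟩
  | cons x rest ih =>
    intro idx hmem
    have hx : x ≠ d := fun h => hmem (h ▸ List.mem_cons_self)
    have hne : (x == d) = false := by simp [hx]
    have hmem' : d ∉ rest := fun h => hmem (List.mem_cons_of_mem _ h)
    obtain ⟨ih0, ih1, ih2⟩ := ih (idx + 1) hmem'
    by_cases hge : d ≤ x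
    · have hgeb : (decide (d ≤ x)) = true := by simp [hge]
      refine ⟨?_, fun f => ?_, fun f s => ?_⟩
      · simp only [altLoopB, hne, Bool.false_eq_true, if_false, hge, if_true,
          List.filter_cons]
        rw [ih1 x]
        cases h : rest.filter (fun y => decide (d ≤ y)) <;> simp
      · simp only [altLoopB, hne, Bool.false_eq_true, if_false, hge, if_true,
          List.filter_cons]
        rw [ih2 f x]
        simp
      · simp only [altLoopB, hne, Bool.false_eq_true, if_false, hge, if_true]
        exact ih2 f s
    · have hgeb : (decide (d ≤ x)) = false := by simp [hge]
      refine ⟨?_, fun f => ?_, fun f s => ?_⟩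
      · simp only [altLoopB, hne, Bool.false_eq_true, if_false, hge, if_false,
          List.filter_cons, hgeb]
        exact ih0
      · simp only [altLoopB, hne, Bool.false_eq_true, if_false, hge, if_false,
          List.filter_cons, hgeb]
        exact ih1 f
      · simp only [altLoopB, hne, Bool.false_eq_true, if_false, hge, if_false]
        exact ih2 f s

-- ===== VERDICT (by name: the statement is the Claim_ definition above) =====
theorem exec_date_py_spec : Claim_equal_exec_date_py := by
  intro d mode trade_days _
  unfold Spec_exec_date_py exec_date_py exec_date_py_alt
  by_cases hmode : mode == "close"
  · rw [if_pos hmode, if_pos hmode]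
  · rw [if_neg hmode, if_neg hmode]
    by_cases hmem : d ∈ trade_days
    · have hc : trade_days.contains d = true := by simpa using hmem
      rw [if_pos hc]
      have hsome : (PySem.List.index? trade_days d).isSome :=
        (PySem.List.index?_isSome_iff trade_days d).mpr hmem
      obtain ⟨k, hk⟩ := Option.isSome_iff_exists.mp hsome
      obtain ⟨hklt, -, -⟩ := PySem.List.getElem_of_index?_eq_some hk
      rw [execTailA_eq trade_days d k hk,
        altLoopB_mem d trade_days trade_days 0 none none k (by simp) hk]
      simp only [Nat.zero_add]
      by_cases hsucc : k + 1 < trade_days.length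
      · rw [if_pos hsucc]
        have hmin : min ((k : Int) + 1) ((trade_days.length : Int) - 1)
            = (k : Int) + 1 := min_eq_left (by omega)
        rw [hmin]
      · rw [if_neg hsucc]
        have hlen : trade_days ≠ [] := List.ne_nil_of_mem hmem
        have hmin : min ((k : Int) + 1) ((trade_days.length : Int) - 1)
            = ((trade_days.length - 1 : Nat) : Int) := by
          rw [min_eq_right (by omega)]
          push_cast [Nat.cast_sub (by omega : 1 ≤ trade_days.length)]
          ring
        rw [hmin, PySem.List.pyGetD_natCast,
          PySem.List.pyGetD_neg_one trade_days d hlen,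
          List.getD_eq_getElem _ _ (by omega), List.getLast_eq_getElem]
    · rw [if_neg (show ¬ trade_days.contains d = true by simpa using hmem)]
      rw [(altLoopB_not_mem d trade_days trade_days 0 hmem).1]
      cases hf : trade_days.filter (fun x => decide (d ≤ x)) with
      | nil => rfl
      | cons d' rest =>
        cases rest with
        | nil =>
          show execTailA [d'] d' = d'
          rw [execTailA_eq [d'] d' 0 (PySem.List.index?_cons_self d' [])]
          norm_num [PySem.List.pyGetD_zero_cons]
        | cons sg rest2 =>
          show execTailA (d' :: sg :: rest2) d' = sg
          rw [execTailA_eq (d' :: sg :: rest2) d' 0 (PySem.List.index?_cons_self d' (sg :: rest2))]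
          have hmin : min (((0 : Nat) : Int) + 1) (((d' :: sg :: rest2).length : Int) - 1)
              = ((1 : Nat) : Int) := by
            rw [min_eq_left (by simp)]
            simp
          rw [hmin, PySem.List.pyGetD_natCast]
          rfl
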